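-- pv_equiv track=rewrite | github.com/MUmarShahbaz/A-level-Python | Data Structures/Binary Tree/Binary Tree - DO NOT USE - 1D CLASSLESS ARRAY VARIATION.py | TraceNode
-- ===== SOURCE A (Python) =====
-- def TraceNode(offset):
--     node = 0
--     level = 0
--     while(offset - (pow(2, level) - 1) >= 0):
--         level+= 1
--     node = offset - (pow(2, level - 1) - 1) + 1
--     location = [level, node]
--     return location
-- ===== SOURCE B (Python) =====
-- def TraceNode(offset):
--     # Closed-form: level is the smallest L with 2**L > offset + 1, i.e. bit_length.
--     level = (offset + 1).bit_length()
--     node = offset - ((1 << (level - 1)) - 1) + 1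
--     return [level, node]
-- ===== Notes on version B (the rewrite author's own statement) =====
-- stated objective: simpler
-- what changed: Replaces the level-searching while loop by a closed-form bit_length computation (level = (offset+1).bit_length()), dropping the loop entirely.
-- outside the precondition, e.g. on TraceNode(-3): A returns [0, -1.5], B returns [2, -3]; on TraceNode(-1): A returns [0, 0.5], B raises ValueError
import Mathlib
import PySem

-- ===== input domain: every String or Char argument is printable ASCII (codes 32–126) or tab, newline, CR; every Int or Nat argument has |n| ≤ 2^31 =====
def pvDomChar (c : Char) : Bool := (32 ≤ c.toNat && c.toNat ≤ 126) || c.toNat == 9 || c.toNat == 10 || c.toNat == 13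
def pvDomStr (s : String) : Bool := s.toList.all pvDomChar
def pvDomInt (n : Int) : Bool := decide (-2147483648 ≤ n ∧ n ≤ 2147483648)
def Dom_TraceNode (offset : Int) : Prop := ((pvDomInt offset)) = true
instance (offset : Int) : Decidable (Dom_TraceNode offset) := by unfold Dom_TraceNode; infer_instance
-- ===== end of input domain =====

-- B replaces A's level-searching while loop by a closed-form bit_length computation (simpler, loop-free);
-- return-value equivalence is claimed for offset ≥ 0 (see Pre_ below).

-- ===== PORT A =====
-- the while loop of A: increment level while offset - (2^level - 1) ≥ 0.
-- fuel only makes the recursion structural; it never runs out (fuel = offset.toNat + 2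
-- exceeds the number of iterations: for offset < 0 the condition fails at once, and for
-- offset ≥ 0 the loop stops after (offset+1).log2 + 2 ≤ offset + 2 tests).
def TraceNodeLoop (fuel : Nat) (offset : Int) (level : Nat) : Nat :=
  match fuel with
  | 0 => level
  | fuel + 1 =>
    if offset - ((2:Int)^level - 1) ≥ 0 then TraceNodeLoop fuel offset (level + 1) else level

def TraceNode (offset : Int) : List Int :=
  -- node = 0 (immediately overwritten), level = loop result
  let level := TraceNodeLoop (offset.toNat + 2) offset 0
  let node := offset - ((2:Int)^(level - 1) - 1) + 1
  [(level : Int), node]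

-- ===== PORT B =====
-- Python int.bit_length, exact on all ints (negative uses absolute value)
def pyBitLength (n : Int) : Nat :=
  if n = 0 then 0 else n.natAbs.log2 + 1

def TraceNode_alt (offset : Int) : List Int :=
  let level := pyBitLength (offset + 1)
  let node := offset - ((2:Int)^(level - 1) - 1) + 1
  [(level : Int), node]

-- ===== PRECONDITION & SPEC =====
-- Pre_ excludes offset < 0, where A's node line computes pow(2, -1) = 0.5 and A returns a float,
-- not an int, in its result list (outside the declared return type).
def Pre_TraceNode (offset : Int) : Prop := 0 ≤ offset
instance (offset : Int) : Decidable (Pre_TraceNode offset) := by unfold Pre_TraceNode; infer_instance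
def pvWitness_TraceNode : Int := 6
def Spec_TraceNode (offset : Int) (out : List Int) : Prop := out = TraceNode_alt offset
instance (offset : Int) (out : List Int) : Decidable (Spec_TraceNode offset out) := by unfold Spec_TraceNode; infer_instance

-- ===== CLAIM (what is proved, stated in full; the proofs are below) =====
def Claim_equal_TraceNode : Prop := ∀ (offset : Int), Dom_TraceNode offset → Pre_TraceNode offset → Spec_TraceNode offset (TraceNode offset)

-- ===== LEMMAS AND PROOFS =====

-- The loop, started at any level with level + d = n.log2 + 1 (n = offset+1 ≥ 1) and fuel ≥ d,
-- returns n.log2 + 1.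
theorem traceNodeLoop_eq (offset : Int) (n : Nat) (hn : 1 ≤ n) (hoff : offset + 1 = (n : Int)) :
    ∀ (d level fuel : Nat), level + d = n.log2 + 1 → d ≤ fuel →
      TraceNodeLoop fuel offset level = n.log2 + 1 := by
  intro d
  induction d with
  | zero =>
    intro level fuel hlev _
    have hlev' : level = n.log2 + 1 := by omega
    subst hlev'
    have hlt : n < 2 ^ (n.log2 + 1) := Nat.lt_log2_self
    have hlt' : ¬ offset - ((2:Int)^(n.log2 + 1) - 1) ≥ 0 := by
      have : ((n : Int)) < ((2 ^ (n.log2 + 1) : Nat) : Int) := by exact_mod_cast hlt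
      push_cast at this
      omega
    cases fuel with
    | zero => rfl
    | succ fuel => simp only [TraceNodeLoop, if_neg hlt']
  | succ d ih =>
    intro level fuel hlev hfuel
    cases fuel with
    | zero => omega
    | succ fuel =>
      have hle : level ≤ n.log2 := by omega
      have h2 : 2 ^ level ≤ n := by
        calc 2 ^ level ≤ 2 ^ n.log2 := Nat.pow_le_pow_right (by norm_num) hle
          _ ≤ n := Nat.log2_self_le (by omega)
      have hcond : offset - ((2:Int)^level - 1) ≥ 0 := by
        have : ((2 ^ level : Nat) : Int) ≤ ((n : Int)) := by exact_mod_cast h2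
        push_cast at this
        omega
      simp only [TraceNodeLoop, if_pos hcond]
      exact ih (level + 1) fuel (by omega) (by omega)

-- ===== VERDICT (by name: the statement is the Claim_ definition above) =====
theorem TraceNode_spec : Claim_equal_TraceNode := by
  intro offset _ hpre
  have h0 : 0 ≤ offset := hpre
  unfold Spec_TraceNode TraceNode TraceNode_alt
  have hn : offset + 1 = ((offset + 1).toNat : Int) := by omega
  set n : Nat := (offset + 1).toNat with hndef
  have hn1 : 1 ≤ n := by omega
  have hlog : n.log2 ≤ n := by
    have h1 : n.log2 < 2 ^ n.log2 := Nat.lt_two_pow_self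
    have h2 : 2 ^ n.log2 ≤ n := Nat.log2_self_le (by omega)
    omega
  have hloop : TraceNodeLoop (offset.toNat + 2) offset 0 = n.log2 + 1 :=
    traceNodeLoop_eq offset n hn1 hn (n.log2 + 1) 0 (offset.toNat + 2) (by omega) (by omega)
  have hbl : pyBitLength (offset + 1) = n.log2 + 1 := by
    unfold pyBitLength
    rw [if_neg (by omega : ¬ offset + 1 = 0)]
    congr 1
    have : (offset + 1).natAbs = n := by omega
    rw [this]
  rw [hloop, hbl]
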